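-- pv_equiv track=rewrite | github.com/Sumergrewal/Salesforce-Help-bot | extract_sf_pdfs.py | chunk_words
-- ===== SOURCE A (Python) =====
-- from typing import Dict, List, Iterable, Tuple
--
-- def chunk_words(words: List[str], max_tokens: int, overlap: int) -> List[Tuple[int, int]]:
--     # returns list of (start_idx, end_idx) windows over words
--     if max_tokens <= 0:
--         raise ValueError("max_tokens must be > 0")
--     if overlap >= max_tokens:
--         raise ValueError("overlap must be smaller than max_tokens")
--     stride = max_tokens - overlap
--     spans = []
--     i = 0
--     n = len(words)
--     while i < n:
--         j = min(i + max_tokens, n)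
--         spans.append((i, j))
--         if j == n:
--             break
--         i += stride
--     return spans
-- ===== SOURCE B (Python) =====
-- from typing import List, Tuple
--
-- def chunk_words(words: List[str], max_tokens: int, overlap: int) -> List[Tuple[int, int]]:
--     # closed-form window count instead of an iterative step-and-break loop
--     if max_tokens <= 0:
--         raise ValueError("max_tokens must be > 0")
--     if overlap >= max_tokens:
--         raise ValueError("overlap must be smaller than max_tokens")
--     n = len(words)
--     if n == 0:
--         return []
--     if n <= max_tokens:
--         return [(0, n)]
--     stride = max_tokens - overlap
--     # last window index: first k covering n, but never a start at or past n
--     last = min((n - max_tokens + stride - 1) // stride, (n - 1) // stride)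
--     return [(k * stride, min(k * stride + max_tokens, n)) for k in range(last + 1)]
-- ===== Notes on version B (the rewrite author's own statement) =====
-- stated objective: alternative
-- what changed: Replaces A's iterative step-and-break while-loop with a closed-form computation of the last window index (integer ceiling, capped so no window starts at or past n) and a direct range comprehension of the (start,end) spans.
import Mathlib
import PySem

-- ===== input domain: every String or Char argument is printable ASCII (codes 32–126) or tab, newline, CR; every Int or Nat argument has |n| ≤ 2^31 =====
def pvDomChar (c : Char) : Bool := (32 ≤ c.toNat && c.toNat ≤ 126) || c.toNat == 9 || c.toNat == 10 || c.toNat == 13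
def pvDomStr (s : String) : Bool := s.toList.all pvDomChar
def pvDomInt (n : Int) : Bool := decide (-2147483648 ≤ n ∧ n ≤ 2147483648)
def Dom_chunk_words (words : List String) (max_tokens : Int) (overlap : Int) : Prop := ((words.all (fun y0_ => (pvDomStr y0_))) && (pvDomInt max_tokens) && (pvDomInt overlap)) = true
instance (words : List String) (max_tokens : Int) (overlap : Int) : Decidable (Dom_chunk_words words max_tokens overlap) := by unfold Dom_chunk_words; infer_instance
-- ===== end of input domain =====

-- B replaces A's iterative step-and-break while-loop by a closed-form count of windows
-- and a direct comprehension (objective: alternative / idiomatic; same asymptotic cost).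

-- ===== PORT A =====
-- A's while-loop, fuel-indexed (fuel is ample inside Pre_, where stride ≥ 1)
def chunkLoop (n mt stride : Int) : Int → Nat → List (Int × Int)
  | _, 0 => []
  | i, fuel+1 =>
    if i < n then
      let j := min (i + mt) n
      if j = n then [(i, j)] else (i, j) :: chunkLoop n mt stride (i + stride) fuel
    else []

def chunk_words (words : List String) (max_tokens : Int) (overlap : Int) : List (Int × Int) :=
  if max_tokens ≤ 0 then []          -- Python: raise ValueError (excluded by Pre_)
  else if overlap ≥ max_tokens then []  -- Python: raise ValueError (excluded by Pre_)
  else chunkLoop (words.length : Int) max_tokens (max_tokens - overlap) 0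
        ((words.length : Int).toNat + 2)

-- ===== PORT B =====
def chunk_words_alt (words : List String) (max_tokens : Int) (overlap : Int) : List (Int × Int) :=
  if max_tokens ≤ 0 then []          -- Python: raise ValueError (excluded by Pre_)
  else if overlap ≥ max_tokens then []  -- Python: raise ValueError (excluded by Pre_)
  else if (words.length : Int) = 0 then []
  else if (words.length : Int) ≤ max_tokens then [(0, (words.length : Int))]
  else
    (PySem.List.pyRange 0
        (min (PySem.Int.floordiv ((words.length : Int) - max_tokens + (max_tokens - overlap) - 1) (max_tokens - overlap))
             (PySem.Int.floordiv ((words.length : Int) - 1) (max_tokens - overlap)) + 1) 1).map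
      (fun k => (k * (max_tokens - overlap), min (k * (max_tokens - overlap) + max_tokens) (words.length : Int)))

-- ===== PRECONDITION & SPEC =====
-- Pre_ excludes exactly the inputs on which A raises ValueError (both programs raise there).
def Pre_chunk_words (words : List String) (max_tokens : Int) (overlap : Int) : Prop :=
  0 < max_tokens ∧ overlap < max_tokens
instance (words : List String) (max_tokens : Int) (overlap : Int) : Decidable (Pre_chunk_words words max_tokens overlap) := by unfold Pre_chunk_words; infer_instance

def pvWitness_chunk_words : List String × Int × Int := (["a", "b", "c", "d", "e"], 2, 1)

def Spec_chunk_words (words : List String) (max_tokens : Int) (overlap : Int) (out : List (Int × Int)) : Prop := out = chunk_words_alt words max_tokens overlap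
instance (words : List String) (max_tokens : Int) (overlap : Int) (out : List (Int × Int)) : Decidable (Spec_chunk_words words max_tokens overlap out) := by unfold Spec_chunk_words; infer_instance

-- ===== CLAIM (what is proved, stated in full; the proofs are below) =====
def Claim_equal_chunk_words : Prop := ∀ (words : List String) (max_tokens : Int) (overlap : Int), Dom_chunk_words words max_tokens overlap → Pre_chunk_words words max_tokens overlap → Spec_chunk_words words max_tokens overlap (chunk_words words max_tokens overlap)

-- ===== LEMMAS AND PROOFS =====

-- main invariant: from start index k*s, the loop produces exactly the windows k..L
lemma chunkLoop_eq (n mt s L : Int) (hs : 1 ≤ s) (hmt : 0 < mt) (hn : mt < n)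
    (hL : L = min (PySem.Int.floordiv (n - mt + s - 1) s) (PySem.Int.floordiv (n - 1) s)) :
    ∀ (fuel : Nat) (k : Int), 0 ≤ k → k ≤ L → L - k + 2 ≤ (fuel : Int) →
      chunkLoop n mt s (k * s) fuel =
        (PySem.List.pyRange k (L + 1) 1).map (fun j => (j * s, min (j * s + mt) n)) := by
  have hs0 : (0:Int) < s := by omega
  set c := PySem.Int.floordiv (n - mt + s - 1) s with hc
  set fl := PySem.Int.floordiv (n - 1) s with hfl
  have hc1 : n - mt ≤ c * s := by
    have h : n - mt + s - 1 < (c + 1) * s :=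
      (PySem.Int.floordiv_lt_iff_lt_mul hs0).1
        (show PySem.Int.floordiv (n - mt + s - 1) s < c + 1 by omega)
    nlinarith
  have hc2 : ∀ q : Int, q ≤ c → q * s ≤ n - mt + s - 1 :=
    fun q hq => (PySem.Int.le_floordiv_iff_mul_le hs0).1 hq
  have hfl1 : fl * s ≤ n - 1 :=
    (PySem.Int.le_floordiv_iff_mul_le hs0).1 le_rfl
  have hfl2 : n - 1 < (fl + 1) * s :=
    (PySem.Int.floordiv_lt_iff_lt_mul hs0 (q := fl + 1)).1 (by omega)
  intro fuel
  induction fuel with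
  | zero => intro k _ hk2 hf; exfalso; omega
  | succ m ih =>
    intro k hk0 hkL hf
    have hkstart : k * s ≤ n - 1 := by
      calc k * s ≤ fl * s := by
            apply mul_le_mul_of_nonneg_right _ (le_of_lt hs0); omega
        _ ≤ n - 1 := hfl1
    have hlt : k * s < n := by omega
    rcases eq_or_lt_of_le hkL with heq | hlt2
    · -- k = L : last window
      subst heq
      rw [PySem.List.pyRange_one_cons (by omega), PySem.List.pyRange_one_eq_nil (by omega)]
      simp only [chunkLoop, if_pos hlt, List.map]
      by_cases hj : min (k * s + mt) n = n
      · rw [if_pos hj]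
      · rw [if_neg hj]
        have hjlt : k * s + mt < n := by
          rcases lt_or_ge (k * s + mt) n with h | h
          · exact h
          · exact absurd (by omega : min (k * s + mt) n = n) hj
        -- then L = fl < c, so the next start (k+1)*s is ≥ n and the inner call returns []
        have hkc : k * s < c * s := by omega
        have hkltc : k < c := lt_of_mul_lt_mul_right hkc (le_of_lt hs0)
        have hkfl : k = fl := by
          have : k = min c fl := hL
          omega
        have hnext : n ≤ (k + 1) * s := by rw [hkfl]; omega
        have : chunkLoop n mt s (k * s + s) m = [] := by
          cases m with
          | zero => exfalso; omega
          | succ m' =>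
            simp only [chunkLoop]
            rw [if_neg (by nlinarith : ¬ (k * s + s < n))]
        rw [this]
    · -- k < L : interior window, recurse
      have hkc : k + 1 ≤ c := by omega
      have hstep : (k + 1) * s ≤ n - mt + s - 1 := hc2 (k + 1) hkc
      have hjlt : k * s + mt < n := by nlinarith
      have hj : min (k * s + mt) n ≠ n := by omega
      have hmin : min (k * s + mt) n = k * s + mt := by omega
      rw [PySem.List.pyRange_one_cons (by omega)]
      simp only [chunkLoop, if_pos hlt, if_neg hj, List.map]
      rw [show k * s + s = (k + 1) * s by ring,
          ih (k + 1) (by omega) (by omega) (by omega)]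

-- ===== VERDICT (by name: the statement is the Claim_ definition above) =====
theorem chunk_words_spec : Claim_equal_chunk_words := by
  intro words mt ov _ hpre
  obtain ⟨hmt, hov⟩ := hpre
  unfold Spec_chunk_words chunk_words chunk_words_alt
  rw [if_neg (by omega), if_neg (by omega), if_neg (by omega), if_neg (by omega)]
  set n : Int := (words.length : Int) with hn
  have hn0 : 0 ≤ n := by positivity
  set s := mt - ov with hsdef
  have hs : 1 ≤ s := by omega
  by_cases h0 : n = 0
  · rw [if_pos h0]
    have : n.toNat + 2 = 2 := by omega
    rw [this]
    simp only [chunkLoop]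
    rw [if_neg (by omega)]
  · rw [if_neg h0]
    by_cases h1 : n ≤ mt
    · rw [if_pos h1]
      have hfuel : ∃ m, n.toNat + 2 = m + 1 := ⟨n.toNat + 1, rfl⟩
      obtain ⟨m, hm⟩ := hfuel
      rw [hm]
      simp only [chunkLoop]
      rw [if_pos (by omega)]
      have hminn : min (0 + mt) n = n := by omega
      rw [if_pos hminn, hminn]
    · rw [if_neg h1]
      set L := min (PySem.Int.floordiv (n - mt + s - 1) s) (PySem.Int.floordiv (n - 1) s) with hL
      have hLle : L ≤ PySem.Int.floordiv (n - 1) s := min_le_right _ _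
      have hfl1 : PySem.Int.floordiv (n - 1) s * s ≤ n - 1 :=
        (PySem.Int.le_floordiv_iff_mul_le (by omega : (0:Int) < s)).1 le_rfl
      have hL0 : 0 ≤ L := by
        have h1' : (0:Int) ≤ PySem.Int.floordiv (n - mt + s - 1) s :=
          (PySem.Int.le_floordiv_iff_mul_le (by omega : (0:Int) < s)).2 (by omega)
        have h2' : (0:Int) ≤ PySem.Int.floordiv (n - 1) s :=
          (PySem.Int.le_floordiv_iff_mul_le (by omega : (0:Int) < s)).2 (by omega)
        omega
      have hLn : L ≤ n - 1 := by
        have : L * s ≤ PySem.Int.floordiv (n - 1) s * s :=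
          mul_le_mul_of_nonneg_right hLle (by omega)
        nlinarith
      have := chunkLoop_eq n mt s L hs hmt (by omega) hL (n.toNat + 2) 0 le_rfl hL0 (by push_cast; omega)
      simpa using this
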